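/- GENERATED by mk_final_copies.py from the proof of the farm's unit `vorbis_decode_packet_rest.11` (farm:vorbis_decode_packet_rest.11.3: Lemmas.lean) as the
   re-elaboration sweep compiled it — do not edit. -/
import Asan.CheckWalk
import Vorbis.Spec.PacketRestFrame
import Vorbis.Spec.PacketRestTest

/-!
  LEMMAS OF THE UNIT `vorbis_decode_packet_rest.11` (the deferred floors: `memset` or `do_floor` per channel).

  The pure part: how the decode-time invariant `DecodeInv` and the assertion `Stable` of the function are carried over a batch
  of stores each of which goes into the stack region or into a channel buffer (the only stores of this segment and of its two
  callees).
-/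

open X86 X86.User Asan Vorbis Vorbis.Spec Vorbis.Spec.vorbis_decode_packet_rest

set_option maxRecDepth 4000
set_option maxHeartbeats 4000000

namespace Vorbis.Spec.vorbis_decode_packet_rest_11

/-- **Where a store of this segment may go**: into the stack region, or into the channel buffer of a channel `c < channels`
(read in the memory `mem`). -/
def SpanOK11 (mem : Mem) (f : Nat) (s : Span) : Prop :=
  (0x700000 ≤ s.lo ∧ s.hi ≤ 0x800000) ∨
  (∃ c : Nat, (c : Int) < stb_vorbis.channels mem f ∧ stb_vorbis.channel_buffers mem f c ≤ s.lo ∧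
    s.hi ≤ stb_vorbis.channel_buffers mem f c + 4 * bsize mem f 1)

section carry
variable {others : List Obj} {frames : List (Nat × FrameLayout)} {len : Nat} {Ar : Arena} {stored room : Int}
  {ysz : Nat → Nat} {mem mem' : Mem} {f : Nat}

/-- A store of this segment is a decode-time store. -/
theorem SpanOK11.storeOK (h : DecodeInv others frames len Ar stored room ysz mem f) {s : Span} (hs : SpanOK11 mem f s) :
    StoreOK (RunBlk Ar len) mem f s := by
  rcases hs with ⟨h1, h2⟩ | ⟨c, hc, h1, h2⟩
  · apply StoreOK.off
    intro B hB
    have := h.offStack B hB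
    omega
  · exact StoreOK.buffer _ (SampleBuf.chan c hc) h1 h2

/-- A store of this segment does not meet `*f`. -/
theorem SpanOK11.offObj (h : DecodeInv others frames len Ar stored room ysz mem f) {s : Span} (hs : SpanOK11 mem f s) :
    f + 1808 ≤ s.lo ∨ s.hi ≤ f := by
  rcases hs with ⟨h1, h2⟩ | ⟨c, hc, h1, h2⟩
  · have := h.objOff
    simp only [voff] at this
    omega
  · have hd := h.sep.bufobj _ (SampleBuf.chan c hc)
    simp only [vblock, voff] at hd
    omega

/-- **`*f` reads the same after a batch of stores of this segment.** -/
theorem obj_kept (h : DecodeInv others frames len Ar stored room ysz mem f) {spans : List Span}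
    (hs : Mem.SameExcept spans mem mem') (hw : ∀ s, s ∈ spans → SpanOK11 mem f s) : (objBlock f).Kept mem mem' := by
  apply Block.Kept.of_sameExcept hs _ (h.ok.no_wrap h.ob1)
  intro w hwm
  have := (hw w hwm).offObj h
  simp only [vblock, voff]
  omega

/-- **THE DECODE-TIME INVARIANT OVER A BATCH OF STORES OF THIS SEGMENT** (stack stores, stores into channel buffers): the CONFIG
part by `DecodeInv.frame_stores`; the mutable part (`Bits`, M7, W1, ADO) reads fields of `*f` only, which is kept. `hcov`: the
shadow still covers the live set (`ShadowInv.untouched`). -/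
theorem inv_step11 (h : DecodeInv others frames len Ar stored room ysz mem f) {spans : List Span}
    (hs : Mem.SameExcept spans mem mem') (hw : ∀ s, s ∈ spans → SpanOK11 mem f s)
    (hcov : Covers (Asan.Live (stackObjs frames ++ others)) mem') :
    DecodeInv others frames len Ar stored room ysz mem' f := by
  have hk := obj_kept h hs hw
  have hv := h.fb.vorbis
  have hbits := hv.bits
  refine h.frame_stores hs (fun s hsm => (hw s hsm).storeOK h) ⟨hcov, h.ok, h.live⟩ ?_ ?_ ?_ ?_
  · exact ADO.transfer h.fb.ado (ObjEq.of_kept_obj hk (by decide))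
  · intro _
    exact hbits.transfer (ObjEq.of_kept_obj hk (by decide)) ⟨hbits.OB1, hbits.OB1a⟩ hbits.OBR hbits.S2
  · intro _
    exact hv.buffers.M7.transfer (ObjEq.of_kept_obj hk (by decide))
  · intro _
    exact hv.w1.transfer (ObjEq.of_kept_obj hk (by decide))

end carry

/-! ### The fields of `*f` the segment reads, in a memory in which `*f` is kept -/

section fields
variable {mem mem' : Mem} {f : Nat}

/-- `f->channels` follows `*f`. -/
theorem channels_kept (hk : (objBlock f).Kept mem mem') : stb_vorbis.channels mem' f = stb_vorbis.channels mem f := by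
  simp only [vacc, voff]
  exact hk.i32 (f + 4) (by simp only [vblock]; omega) (by simp only [vblock, voff]; omega)

/-- `f->blocksize_0 / _1` as numbers follow `*f`. -/
theorem bsize_kept (hk : (objBlock f).Kept mem mem') (b : Nat) : bsize mem' f b = bsize mem f b := by
  apply bsize_congr
  · simp only [vacc, voff]
    exact hk.i32 (f + 152) (by simp only [vblock]; omega) (by simp only [vblock, voff]; omega)
  · simp only [vacc, voff]
    exact hk.i32 (f + 156) (by simp only [vblock]; omega) (by simp only [vblock, voff]; omega)

/-- `f->channel_buffers[c]` follows `*f`. -/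
theorem chanbuf_kept (hk : (objBlock f).Kept mem mem') (c : Nat) (hc : c < 16) :
    stb_vorbis.channel_buffers mem' f c = stb_vorbis.channel_buffers mem f c := by
  simp only [vacc, voff]
  exact hk.ptr (f + 872 + 8 * c) (by simp only [vblock]; omega) (by simp only [vblock, voff]; omega)

/-- `f->finalY[c]` follows `*f`. -/
theorem finalY_kept (hk : (objBlock f).Kept mem mem') (c : Nat) (hc : c < 16) :
    stb_vorbis.finalY mem' f c = stb_vorbis.finalY mem f c := by
  simp only [vacc, voff]
  exact hk.ptr (f + 1264 + 8 * c) (by simp only [vblock]; omega) (by simp only [vblock, voff]; omega)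

/-- `f->mode_count` follows `*f`. -/
theorem mode_count_kept (hk : (objBlock f).Kept mem mem') :
    stb_vorbis.mode_count mem' f = stb_vorbis.mode_count mem f := by
  simp only [vacc, voff]
  exact hk.i32 (f + 480) (by simp only [vblock]; omega) (by simp only [vblock, voff]; omega)

/-- `m->blockflag` of a mode record of `*f` follows `*f`. -/
theorem blockflag_kept (hk : (objBlock f).Kept mem mem') (mode : Nat) (hm : mode < 64) :
    Mode.blockflag mem' (stb_vorbis.mode_config_at f mode) = Mode.blockflag mem (stb_vorbis.mode_config_at f mode) := by
  simp only [vacc, voff]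
  exact hk.u8 (f + 484 + 6 * mode + 0) (by simp only [vblock]; omega) (by simp only [vblock, voff]; omega)

/-- `m->mapping` of a mode record of `*f` follows `*f`. -/
theorem mapping_kept (hk : (objBlock f).Kept mem mem') (mode : Nat) (hm : mode < 64) :
    Mode.mapping mem' (stb_vorbis.mode_config_at f mode) = Mode.mapping mem (stb_vorbis.mode_config_at f mode) := by
  simp only [vacc, voff]
  exact hk.u8 (f + 484 + 6 * mode + 1) (by simp only [vblock]; omega) (by simp only [vblock, voff]; omega)

/-- `n = f->blocksize[m->blockflag]` follows `*f`. -/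
theorem nOf_kept (hk : (objBlock f).Kept mem mem') (mode : Nat) (hm : mode < 64) :
    nOf mem' f (stb_vorbis.mode_config_at f mode) = nOf mem f (stb_vorbis.mode_config_at f mode) := by
  unfold nOf
  rw [blockflag_kept hk mode hm, bsize_kept hk]

/-- `map = &f->mapping[m->mapping]` follows `*f`. -/
theorem mapOf_kept (hk : (objBlock f).Kept mem mem') (mode : Nat) (hm : mode < 64) :
    mapOf mem' f (stb_vorbis.mode_config_at f mode) = mapOf mem f (stb_vorbis.mode_config_at f mode) := by
  unfold mapOf
  rw [mapping_kept hk mode hm]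
  simp only [vacc, voff]
  rw [hk.u64 (f + 472) (by simp only [vblock]; omega) (by simp only [vblock, voff]; omega)]

end fields

/-! ### `Stable` over a batch of stores of this segment -/

/-- **Where a store of this segment may go, seen from the function's frame**: below the spill slots (`[rsp − 3856, steady rsp + 8)`:
the pushes, the callees' frames, the scratch slot `[rsp + 0]`), or into a channel buffer. -/
def StepOK (u : State) (mem : Mem) (s : Span) : Prop :=
  ((u.reg .rsp).toNat - 3856 ≤ s.lo ∧ s.hi ≤ (u.reg .rsp).toNat - 2992) ∨
  (∃ c : Nat, (c : Int) < stb_vorbis.channels mem (fOf u) ∧ stb_vorbis.channel_buffers mem (fOf u) c ≤ s.lo ∧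
    s.hi ≤ stb_vorbis.channel_buffers mem (fOf u) c + 4 * bsize mem (fOf u) 1)

section stable
variable {u₀ : State} {others : List Obj} {frames : List (Nat × FrameLayout)} {len : Nat} {Ar : Arena} {stored room : Int}
  {mode : Nat} {ysz : Nat → Nat} {u : State} {ret : Word} {ls : Int} {v w : State}

/-- The function's stack area lies in the stack region (`AtEntry.room`, `AtEntry.top`). -/
theorem entry_room (hst : Stable u₀ others frames len Ar stored room mode ysz u ret ls v) :
    0x700000 + 3856 ≤ (u.reg .rsp).toNat ∧ (u.reg .rsp).toNat + 8 ≤ 0x800000 :=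
  ⟨hst.entry.room, hst.entry.top⟩

/-- The mode index is below 64 (MD1). -/
theorem mode_lt_64 (hst : Stable u₀ others frames len Ar stored room mode ysz u ret ls v) : mode < 64 := by
  have hpre := hst.pre
  obtain ⟨_, hinv, hargs⟩ := hpre
  exact hinv.fb.vorbis.mode.mode_index_lt hargs.mode_lt

/-- A `StepOK` span is a `SpanOK11` span: the function's stack area lies in the stack region. -/
theorem StepOK.spanOK (hst : Stable u₀ others frames len Ar stored room mode ysz u ret ls v) {s : Span}
    (h : StepOK u v.mem s) : SpanOK11 v.mem (fOf u) s := by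
  obtain ⟨he_room, he_top⟩ := entry_room hst
  rcases h with ⟨h1, h2⟩ | h
  · left
    omega
  · exact Or.inr h

/-- **A channel buffer lies below the stack region or well above it**: it is a setup block of the arena (`DecodeInv.buf`), behind the
32 bytes of its red zone (AR3), and the arena does not meet the stack region (AR1x). -/
theorem chanbuf_where (hinv : DecodeInv others frames len Ar stored room ysz v.mem (fOf u)) {c : Nat}
    (hc : (c : Int) < stb_vorbis.channels v.mem (fOf u)) :
    stb_vorbis.channel_buffers v.mem (fOf u) c + 4 * bsize v.mem (fOf u) 1 ≤ 0x700000 ∨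
      0x800020 ≤ stb_vorbis.channel_buffers v.mem (fOf u) c := by
  have h3 := hinv.config.header.HD3.range
  have hpos : 0 < bsize v.mem (fOf u) 1 := by
    rw [bsize_one]
    omega
  rcases hinv.buf _ (SampleBuf.chan c hc) with h0 | hb
  · simp only [] at h0
    omega
  · have hb' : Ar.Block (stb_vorbis.channel_buffers v.mem (fOf u) c) (4 * bsize v.mem (fOf u) 1) := hb
    have hr := hinv.arena.block_range hb'
    have hl := le_r8 (4 * bsize v.mem (fOf u) 1)
    have h1x := hinv.arena.AR1x
    have h2 := hinv.arena.AR2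
    omega

/-- **A read above the scratch slot, up to the first bytes above the stack region, is not changed by a batch of stores of this
segment** (the spill slots, the saved registers, the return address, the two stack arguments, the callers' `int`s). -/
theorem read_kept (hst : Stable u₀ others frames len Ar stored room mode ysz u ret ls v) {spans : List Span}
    (hs : Mem.SameExcept spans v.mem w.mem) (hw : ∀ s, s ∈ spans → StepOK u v.mem s) (a : Word) (k : Nat)
    (h1 : (u.reg .rsp).toNat - 2992 ≤ a.toNat) (h2 : a.toNat + k ≤ 0x800008) : w.mem.readLE a k = v.mem.readLE a k := by
  obtain ⟨he_room, he_top⟩ := entry_room hst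
  apply hs.readLE a k (by omega)
  intro s hsm
  rcases hw s hsm with ⟨g1, g2⟩ | ⟨c, hc, g1, g2⟩
  · right
    omega
  · have := chanbuf_where hst.inv hc
    omega

/-- **STABLE OVER A BATCH OF STORES OF THIS SEGMENT**: the machine facts of the new state (`rsp`, the text, DF / MXCSR), the
footprint of the batch, and no store to the shadow. -/
theorem stable_step (hst : Stable u₀ others frames len Ar stored room mode ysz u ret ls v)
    (hrsp : w.reg .rsp = spOf u) (hcode : Vorbis.CodeOK u₀ w.mem) (habi : abiInv w) {spans : List Span}
    (hs : Mem.SameExcept spans v.mem w.mem) (hw : ∀ s, s ∈ spans → StepOK u v.mem s)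
    (hun : ShadowUntouched v.mem w.mem) : Stable u₀ others frames len Ar stored room mode ysz u ret ls w := by
  obtain ⟨he_room, he_top⟩ := entry_room hst
  have hm64 := mode_lt_64 hst
  have hpre := hst.pre
  obtain ⟨hsh0, hinv0, hargs⟩ := hpre
  have hsp : ∀ s, s ∈ spans → SpanOK11 v.mem (fOf u) s := fun s hsm => (hw s hsm).spanOK hst
  have hk := obj_kept hst.inv hs hsp
  have hrd := read_kept hst hs hw
  have hshadow := hst.shadow.untouched hun
  have hinv := inv_step11 hst.inv hs hsp hshadow.shadow.covers
  -- the configuration at the cut point reads as at the function's entry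
  have hd0 : DecodeSame (fOf u) u.mem v.mem :=
    StoreOK.decodeSame hinv0.ok hinv0.ob1 hinv0.sep hst.same (footprint_storeOK hst.pre he_room)
  obtain ⟨ech, eb, eptr⟩ := ConfigOK.buffers_eq (hd0.sub ConfigOK.wins_decode) hinv0.config.header.HD1.2
  have hmeq : mOf u = stb_vorbis.mode_config_at (fOf u) mode := hargs.m_eq
  -- where `p_left` is: a live object of a caller's frame, above the return address
  have hleft := hargs.left_obj
  have hlw := hleft.1.where_ hsh0.inv hsh0.offText (by decide)
  obtain ⟨hl1, hl2⟩ := hleft.2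
  have he_align : (u.reg .rsp).toNat % 8 = 0 := hst.entry.align
  have hsp16 : (u.reg .rsp).toNat + 16 ≤ 0x800000 := by omega
  refine ⟨⟨hst.entry, hst.pre, hrsp, hcode, habi, ?same, ?_, ?_, ?_, ?_, ?_, ?_, ?_, hshadow, hinv⟩,
    ?_, ?_, ?_, ?_, ?_, ?_, ?_, ?_, ?_, ?_, ?_⟩
  case same =>
    refine hst.same.step_same hs ?_
    intro s hsm a h1 h2
    apply covered_footprint
    rcases hw s hsm with ⟨g1, g2⟩ | ⟨c, hc, g1, g2⟩
    · left
      omega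
    · right
      right
      right
      left
      rw [ech] at hc
      refine ⟨c, ?_, ?_, ?_⟩
      · unfold nchan
        omega
      · rw [← (eptr c hc).1]
        omega
      · rw [← (eptr c hc).1, ← eb]
        omega
  · rw [hrd _ _ (by omega) (by omega)]
    exact hst.ra
  · rw [hrd _ _ (by u_omega) (by u_omega)]
    exact hst.s_r15
  · rw [hrd _ _ (by u_omega) (by u_omega)]
    exact hst.s_r14
  · rw [hrd _ _ (by u_omega) (by u_omega)]
    exact hst.s_r13
  · rw [hrd _ _ (by u_omega) (by u_omega)]
    exact hst.s_r12
  · rw [hrd _ _ (by u_omega) (by u_omega)]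
    exact hst.s_rbp
  · rw [hrd _ _ (by u_omega) (by u_omega)]
    exact hst.s_rbx
  · show w.mem.readLE (spOf u + 0x40) 8 = fOf u
    rw [hrd _ _ (by u_omega) (by u_omega)]
    exact hst.slot_f
  · show w.mem.readLE (spOf u + 0x68) 8 = lenOf u
    rw [hrd _ _ (by u_omega) (by u_omega)]
    exact hst.slot_len
  · show w.mem.readLE (spOf u + 0x70) 8 = mOf u
    rw [hrd _ _ (by u_omega) (by u_omega)]
    exact hst.slot_m
  · show sint32 (w.mem.readLE (spOf u + 0x78) 4) = ls
    rw [hrd _ _ (by u_omega) (by u_omega)]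
    exact hst.slot_ls
  · show sint32 (w.mem.readLE (spOf u + 0x7c) 4) = rsOf u
    rw [hrd _ _ (by u_omega) (by u_omega)]
    exact hst.slot_rs
  · show w.mem.readLE (spOf u + 0x50) 4 = nOf w.mem (fOf u) (mOf u)
    rw [hrd _ _ (by u_omega) (by u_omega), hmeq, nOf_kept hk mode hm64, ← hmeq]
    exact hst.slot_n
  · show w.mem.readLE (spOf u + 0x3c) 4 = nOf w.mem (fOf u) (mOf u) / 2
    rw [hrd _ _ (by u_omega) (by u_omega), hmeq, nOf_kept hk mode hm64, ← hmeq]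
    exact hst.slot_n2
  · show w.mem.readLE (spOf u + 0x60) 8 = sbOf u
    rw [hrd _ _ (by u_omega) (by u_omega)]
    exact hst.slot_sb
  · rw [hrd _ _ (by u_omega) (by u_omega)]
    exact hst.arg_re
  · rw [hrd _ _ (by u_omega) (by u_omega)]
    exact hst.arg_left
  · have e : w.mem.i32 (pLeftOf u) = v.mem.i32 (pLeftOf u) := by
      unfold Mem.i32 Mem.u32
      have ea : (addr (pLeftOf u)).toNat = pLeftOf u := toNat_addr _ (by omega)
      rw [hrd _ _ (by rw [ea]; omega) (by rw [ea]; omega)]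
    rw [e]
    exact hst.left_val

end stable

/-! ### The bit-level forms the walker leaves in this segment, as numbers -/

/-- `movsxd r64, r32` of a small non-negative value is the value. -/
theorem sext_small (x : Word) (h : x.toNat < 2 ^ 31) :
    Word.ofBV (BitVec.signExtend 64 (Word.part .w32 x)) = x := by
  apply UInt64.toNat_inj.mp
  rw [toNat_sext32 _ (by rw [toNat_part32]; omega), toNat_part32]
  omega

/-- `mov r32, r32` of a small value is the value. -/
theorem zext_small (x : Word) (h : x.toNat < 2 ^ 32) : Word.ofBV (Word.part .w32 x) = x :=
  Vorbis.Spec.Reader.ofBV_part32_of_lt x h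

/-- The signed value of the low half of a small register value. -/
theorem s32_small (x : Word) (h : x.toNat < 2 ^ 31) : s32 x = (x.toNat : Int) := by
  show (Word.part .w32 x).toInt = _
  rw [toInt_of_lt _ (by rw [toNat_part32]; omega), toNat_part32]
  have : x.toNat % 2 ^ 32 = x.toNat := Nat.mod_eq_of_lt (by omega)
  rw [this]

/-- The signed value of a small dword loaded from memory. -/
theorem toInt_ofNat_small (n : Nat) (h : n < 2 ^ 31) : (BitVec.ofNat 32 n).toInt = (n : Int) := by
  rw [toInt_of_lt _ (by rw [toNat_ofNat32 _ (by omega)]; exact h), toNat_ofNat32 _ (by omega)]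

/-- `add ebx, 1` on a small counter. -/
theorem inc_small (x : Word) (i : Nat) (hx : x.toNat = i) (h : i < 2 ^ 31) :
    Word.ofBV (Word.part .w32 x + 1#32) = UInt64.ofNat (i + 1) := by
  apply UInt64.toNat_inj.mp
  rw [toNat_ofBV32, BitVec.toNat_add, toNat_part32, hx]
  have e1 : (1#32).toNat = 1 := by decide
  rw [e1, UInt64.toNat_ofNat']
  omega

/-- The frame object `really_zero_channel` (1024 bytes at `base + 1664`) is a live object inside the function. -/
theorem rzc_mem (others : List Obj) (frames : List (Nat × FrameLayout)) (u : State) :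
    (⟨(u.reg .rsp).toNat - 2872 + 1664, 1024, .stack⟩ : Obj) ∈ stackObjs (framesIn frames u) ++ others := by
  unfold framesIn
  rw [stackObjs_cons]
  apply List.mem_append_left
  apply List.mem_append_left
  unfold FrameLayout.objsAt Vorbis.Frames.vorbis_decode_packet_rest
  simp only [List.map_cons, List.map_nil, List.mem_cons]
  right
  right
  right
  left
  trivial

/-! ### The two callees' preconditions -/

section callees
variable {others : List Obj} {frames : List (Nat × FrameLayout)} {len : Nat} {Ar : Arena} {stored room : Int}
  {ysz : Nat → Nat}

/-- **The block size of a mode is at most `b1 ≤ 8192`, and `b1 > 0`** (HD3: `64 ≤ b0 ≤ b1 ≤ 8192`; whatever `blockflag` is, the size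
read is `b0` or `b1`). `_hmode` is not needed for the bound; it documents which records the lemma is meant for. -/
theorem nOf_le {mem : Mem} {f : Nat} (hinv : DecodeInv others frames len Ar stored room ysz mem f) {mode : Nat}
    (_hmode : (mode : Int) < stb_vorbis.mode_count mem f) :
    nOf mem f (stb_vorbis.mode_config_at f mode) ≤ bsize mem f 1 ∧ bsize mem f 1 ≤ 8192 ∧ 0 < bsize mem f 1 := by
  have h3 := hinv.config.header.HD3.range
  rw [bsize_one]
  unfold nOf bsize
  split <;> omega

/-- `shl r64, 2` of a small value is the multiplication by 4. -/
theorem shl2_small (y : Word) (h : y.toNat < 2 ^ 32) : (y <<< 2).toNat = 4 * y.toNat := by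
  rw [UInt64.toNat_shiftLeft]
  have e2 : (2 : UInt64).toNat % 64 = 2 := by decide
  rw [e2, Nat.shiftLeft_eq]
  omega

/-- **do_floor's precondition at its call site 0x11187a**, from the invariant at the loop head (memory of `v`) and the state `s` at
do_floor's entry, which differs from `v` by stack stores only (`PacketRestTest.do_floor_pre` with the fields of `*f` carried). -/
theorem floor_pre {v s : State} {f : Nat} (hinv : DecodeInv others frames len Ar stored room ysz v.mem f)
    {spans : List Span} (hs : Mem.SameExcept spans v.mem s.mem) (hw : ∀ w, w ∈ spans → SpanOK11 v.mem f w)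
    (hsh : ShadowPre others frames s) (hrdi : (s.reg .rdi).toNat = f) (mode c : Nat)
    (hmode : (mode : Int) < stb_vorbis.mode_count v.mem f)
    (hrsi : (s.reg .rsi).toNat = mapOf v.mem f (stb_vorbis.mode_config_at f mode))
    (hc : (c : Int) < stb_vorbis.channels v.mem f) (hrdx : s32 (s.reg .rdx) = c)
    (hr8 : (s.reg .r8).toNat = stb_vorbis.channel_buffers v.mem f c)
    (hr9 : (s.reg .r9).toNat = stb_vorbis.finalY v.mem f c)
    (hn : (s32 (s.reg .rcx) / 2).toNat ≤ bsize v.mem f 1) :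
    (do_floor.spec others frames (RunBlk Ar len) (Mode.mapping v.mem (stb_vorbis.mode_config_at f mode))).pre s := by
  have hk := obj_kept hinv hs hw
  have hinv' := inv_step11 hinv hs hw hsh.inv.shadow.covers
  have hm64 : mode < 64 := hinv.fb.vorbis.mode.mode_index_lt hmode
  have hc16 : c < 16 := by
    have := hinv.config.header.HD1
    omega
  have hb := nOf_le hinv hmode
  rw [← mapping_kept hk mode hm64, ← hrdi]
  apply PacketRestTest.do_floor_pre s mode c hsh
  · rw [hrdi]
    exact hinv'
  · rw [hrdi, mode_count_kept hk]
    exact hmode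
  · rw [hrdi, mapOf_kept hk mode hm64]
    exact hrsi
  · rw [hrdi, channels_kept hk]
    exact hc
  · exact hrdx
  · rw [hrdi, chanbuf_kept hk c hc16]
    exact hr8
  · rw [hrdi, finalY_kept hk c hc16]
    exact hr9
  · rw [hrdi, bsize_kept hk]
    omega
  · rw [hrdi, bsize_kept hk]
    exact hb.2.2

end callees

/-! ### The loop head's assertion, and the way to it -/

/-- **The assertion at the head of the channel loop, 0x111886** (line 3381), ghost `i`: STABLE ∧ `ebx = i`, `0 ≤ i ≤ C` ∧
`rbp = f` ∧ `r15 = map` ∧ `[0x0] = SB`. -/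
structure AtFloorHead (u₀ : State) (others : List Obj) (frames : List (Nat × FrameLayout)) (len : Nat) (Ar : Arena)
    (stored room : Int) (mode : Nat) (ysz : Nat → Nat) (u : State) (ret : Word)
    (i : Nat) (v : State) : Prop
    extends Stable u₀ others frames len Ar stored room mode ysz u ret (lsOf u) v where
  rip : v.rip = Vorbis.L.vorbis_decode_packet_rest.loop11
  rbx : v.reg .rbx = UInt64.ofNat i
  i_le : (i : Int) ≤ stb_vorbis.channels v.mem (fOf u)
  rbp : v.reg .rbp = u.reg .rdi
  r15 : (v.reg .r15).toNat = mapOf v.mem (fOf u) (mOf u)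
  slot_sb0 : slot64 u v 0x0 = sbOf u

/-- A spill slot `[steady rsp + b]` as the walker normalises its address: `rsp₀ − 3000 + b = rsp₀ − c`. -/
theorem slot_addr (x a b c : Word) (h : a = b + c) : x - a + b = x - c := by
  subst h
  grind

/-- **From the segment's entry to the head of the channel loop** (0x11181f … 0x111832: `r13 = SB`, `ebx = i = 0`, `[rsp] = SB`,
`rbp = f`, `jmp` to the head 0x111886): `At11` gives `AtFloorHead 0`. -/
theorem toFloorHead (Lay : Layout) (hLay : Lay.hi = 0x1000000) (μ : Microarch) (hμ : UserX.MicroOK μ) (u₀ : State)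
    (hcode : HasCodeNat Lay u₀ Vorbis.L.vorbis_decode_packet_rest.entry Vorbis.Code.code_vorbis_decode_packet_rest.nat Vorbis.L.vorbis_decode_packet_rest.size)
    (others : List Obj) (frames : List (Nat × FrameLayout)) (len : Nat) (Ar : Arena) (stored room : Int)
      (mode : Nat) (ysz : Nat → Nat) (e : State) (ret : Word) (v : State)
    (hat : At11 u₀ others frames len Ar stored room mode ysz e ret v) :
    ReachVia Lay μ Vorbis.WayInv v (fun w => AtFloorHead u₀ others frames len Ar stored room mode ysz e ret 0 w) := by
  have he := hat.entry
  v_entry he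
  have hst := hat.toStable
  have w_rip := hat.rip
  have hv_rsp : v.reg .rsp = e.reg .rsp - 3000 := hat.rsp
  have w_eq : Mem.EqOn Vorbis.L.textLo Vorbis.L.textHi u₀.mem v.mem := hat.code
  have hdf : v.flags .df = false := (show abiInv _ from hat.abi).1
  have hmx : v.mxcsr &&& 0x1F80 = 0x1F80 := (show abiInv _ from hat.abi).2
  have hsse := Vorbis.sseOK_of_abiInv hat.abi
  have s20 : v.mem.readLE (e.reg .rsp - 2968) 8 = sbOf e := by
    rw [← slot_addr (e.reg .rsp) 3000 0x20 2968 (by decide)]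
    exact hat.slot_sb20
  have s40 : v.mem.readLE (e.reg .rsp - 2936) 8 = fOf e := by
    rw [← slot_addr (e.reg .rsp) 3000 0x40 2936 (by decide)]
    exact hat.slot_f
  u_walk hcode [hμ.vendor] until [Vorbis.L.vorbis_decode_packet_rest.loop11] span [Vorbis.L.textLo, Vorbis.L.textHi] side (v_side)
  refine ReachVia.done ?_
  have hs : Mem.SameExcept [⟨(e.reg .rsp).toNat - 3000, (e.reg .rsp).toNat - 2992⟩] v.mem s_111832.mem := by
    u_same
  have hw : ∀ s, s ∈ [(⟨(e.reg .rsp).toNat - 3000, (e.reg .rsp).toNat - 2992⟩ : Span)] → StepOK e v.mem s := by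
    intro s hsm
    rw [List.mem_singleton.mp hsm]
    left
    simp only []
    omega
  have hun : ShadowUntouched v.mem s_111832.mem := by v_untouched
  have habi : abiInv s_111832 := by v_inv
  have hrsp : s_111832.reg .rsp = spOf e := by
    rw [w_kept .rsp rfl]
    exact hv_rsp
  have hst' := stable_step hst hrsp w_eq habi hs hw hun
  have hk := obj_kept hst.inv hs (fun s hsm => (hw s hsm).spanOK hst)
  have hm64 := mode_lt_64 hst
  have hmeq : mOf e = stb_vorbis.mode_config_at (fOf e) mode := hst.pre.2.2.m_eq
  have hd1 := hst.inv.config.header.HD1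
  refine ⟨hst', w_rip, ?_, ?_, w_rbp, ?_, ?_⟩
  · rw [w_rbx]
    rfl
  · rw [channels_kept hk]
    omega
  · rw [w_kept .r15 rfl, hmeq, mapOf_kept hk mode hm64, ← hmeq]
    exact hat.r15
  · show s_111832.mem.readLE (e.reg .rsp - 3000 + 0x0) 8 = sbOf e
    have e0 : e.reg .rsp - 3000 + 0x0 = e.reg .rsp - 3000 := by grind
    rw [e0]
    u_resolve
    apply toNat_addr
    unfold sbOf
    omega


end Vorbis.Spec.vorbis_decode_packet_rest_11
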